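-- pv_equiv track=rewrite | github.com/Physics07/Wordle-Solver | src/userlib/guess.py | convert_feedback_to_int
-- ===== SOURCE A (Python) =====
-- def convert_feedback_to_int(feedback: str) -> int:
--     ret = 0
--     for i in range(5):
--         if feedback[i] == 'b':
--             ret += 2 * (3 ** i)
--         elif feedback[i] == 'y':
--             ret += 3 ** i
--     return ret
-- ===== SOURCE B (Python) =====
-- def convert_feedback_to_int(feedback: str) -> int:
--     # Spell the feedback out as a 5-digit base-3 numeral (most significant
--     # digit = position 4) and let int() parse it in base 3.
--     digit = {'b': '2', 'y': '1'}
--     numeral = ''.join(digit.get(feedback[i], '0') for i in (4, 3, 2, 1, 0))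
--     return int(numeral, 3)
-- ===== Notes on version B (the rewrite author's own statement) =====
-- stated objective: alternative
-- what changed: Instead of arithmetically accumulating 2*(3**i) terms in a loop, B builds the feedback's base-3 numeral as a string (mapping b->'2', y->'1', anything else->'0', most-significant digit first) and parses it with int(numeral, 3).
import Mathlib
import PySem

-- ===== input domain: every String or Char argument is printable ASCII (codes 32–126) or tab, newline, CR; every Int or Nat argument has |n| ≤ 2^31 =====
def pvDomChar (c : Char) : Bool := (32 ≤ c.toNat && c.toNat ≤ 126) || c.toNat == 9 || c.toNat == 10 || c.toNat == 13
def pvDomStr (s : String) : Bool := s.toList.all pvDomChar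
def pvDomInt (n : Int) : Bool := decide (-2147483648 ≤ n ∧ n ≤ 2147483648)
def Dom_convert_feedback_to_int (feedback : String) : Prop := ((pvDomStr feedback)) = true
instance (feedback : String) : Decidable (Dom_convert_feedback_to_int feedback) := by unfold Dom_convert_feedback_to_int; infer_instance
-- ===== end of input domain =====

-- B builds the feedback's base-3 numeral as a string and parses it with int(.,3), instead of A's arithmetic power-sum loop; same value.


-- ===== PORT A =====
-- for i in range(5): if feedback[i]=='b': ret += 2*(3**i) elif feedback[i]=='y': ret += 3**i
-- feedback[i] is total here only under Pre_ (length ≥ 5); the .getD ' ' default is never reached inside Pre_.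
def convert_feedback_to_int (feedback : String) : Int :=
  (PySem.List.pyRange 0 5 1).foldl
    (fun ret i =>
      if (PySem.Str.pyGet? feedback i).getD ' ' = 'b' then ret + 2 * 3 ^ i.toNat
      else if (PySem.Str.pyGet? feedback i).getD ' ' = 'y' then ret + 3 ^ i.toNat
      else ret) 0

-- ===== PORT B =====
-- digit.get(feedback[i], '0'): the two-entry dict lookup with default
def cfbDigitChar (c : Char) : Char := if c = 'b' then '2' else if c = 'y' then '1' else '0'

-- numeral = ''.join(digit.get(feedback[i], '0') for i in (4,3,2,1,0)); return int(numeral, 3)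
-- int(numeral, 3) is ported as the standard base-3 parse of the digit characters (exact here:
-- the numeral is always five chars drawn from '0','1','2').
def convert_feedback_to_int_alt (feedback : String) : Int :=
  let numeral : List Char :=
    ([4, 3, 2, 1, 0] : List Int).map (fun i => cfbDigitChar ((PySem.Str.pyGet? feedback i).getD ' '))
  numeral.foldl (fun acc c => acc * 3 + ((c.toNat : Int) - 48)) 0

-- ===== PRECONDITION & SPEC =====
-- Both Pythons raise IndexError when len(feedback) < 5; Pre_ excludes exactly those inputs.
def Pre_convert_feedback_to_int (feedback : String) : Prop := 5 ≤ feedback.toList.length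
instance (feedback : String) : Decidable (Pre_convert_feedback_to_int feedback) := by unfold Pre_convert_feedback_to_int; infer_instance
def pvWitness_convert_feedback_to_int : String := "bybgy"
def Spec_convert_feedback_to_int (feedback : String) (out : Int) : Prop := out = convert_feedback_to_int_alt feedback
instance (feedback : String) (out : Int) : Decidable (Spec_convert_feedback_to_int feedback out) := by unfold Spec_convert_feedback_to_int; infer_instance

-- ===== CLAIM (what is proved, stated in full; the proofs are below) =====
def Claim_equal_convert_feedback_to_int : Prop := ∀ (feedback : String), Dom_convert_feedback_to_int feedback → Pre_convert_feedback_to_int feedback → Spec_convert_feedback_to_int feedback (convert_feedback_to_int feedback)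

-- ===== LEMMAS AND PROOFS =====

-- Per-character digit value of B's numeral as the arithmetic three-way branch.
theorem cfbDigit_val (c : Char) :
    ((cfbDigitChar c).toNat : Int) - 48 =
      (if c = 'b' then 2 else if c = 'y' then 1 else 0) := by
  unfold cfbDigitChar; split_ifs <;> simp

-- List-level identity: A's power-sum over the first five characters equals the base-3
-- parse of B's digit numeral (most-significant first).
theorem pv_key (L : List Char) (h : 5 ≤ L.length) :
    ([(0:Int), 1, 2, 3, 4].foldl
      (fun ret i =>
        if (PySem.List.pyGet? L i).getD ' ' = 'b' then ret + 2 * 3 ^ i.toNat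
        else if (PySem.List.pyGet? L i).getD ' ' = 'y' then ret + 3 ^ i.toNat
        else ret) (0:Int)) =
    ((([4, 3, 2, 1, 0] : List Int).map
        (fun i => cfbDigitChar ((PySem.List.pyGet? L i).getD ' '))).foldl
      (fun acc c => acc * 3 + ((c.toNat : Int) - 48)) 0) := by
  rcases L with _ | ⟨c0, _ | ⟨c1, _ | ⟨c2, _ | ⟨c3, _ | ⟨c4, rest⟩⟩⟩⟩⟩ <;>
    simp only [List.length] at h <;> try omega
  have hA : ∀ (ret : Int) (c : Char) (k : Int),
      (if c = 'b' then ret + 2 * k else if c = 'y' then ret + k else ret) =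
      ret + (if c = 'b' then (2:Int) else if c = 'y' then 1 else 0) * k := by
    intro ret c k; split_ifs <;> ring
  have g0 : PySem.List.pyGet? (c0 :: c1 :: c2 :: c3 :: c4 :: rest) (0:Int) = some c0 := by
    simp [PySem.List.pyGet?, PySem.List.pyIdx?]; rw [if_pos (by omega)]; simp
  have g1 : PySem.List.pyGet? (c0 :: c1 :: c2 :: c3 :: c4 :: rest) (1:Int) = some c1 := by
    simp [PySem.List.pyGet?, PySem.List.pyIdx?]; rw [if_pos (by omega)]; simp
  have g2 : PySem.List.pyGet? (c0 :: c1 :: c2 :: c3 :: c4 :: rest) (2:Int) = some c2 := by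
    simp [PySem.List.pyGet?, PySem.List.pyIdx?]; rw [if_pos (by omega)]; simp
  have g3 : PySem.List.pyGet? (c0 :: c1 :: c2 :: c3 :: c4 :: rest) (3:Int) = some c3 := by
    simp [PySem.List.pyGet?, PySem.List.pyIdx?]; rw [if_pos (by omega)]; simp
  have g4 : PySem.List.pyGet? (c0 :: c1 :: c2 :: c3 :: c4 :: rest) (4:Int) = some c4 := by
    simp [PySem.List.pyGet?, PySem.List.pyIdx?]; rw [if_pos (by omega)]; simp
  simp only [hA]
  simp only [List.map, List.foldl, g0, g1, g2, g3, g4, Option.getD_some, cfbDigit_val]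
  generalize (if c0 = 'b' then (2:Int) else if c0 = 'y' then 1 else 0) = d0
  generalize (if c1 = 'b' then (2:Int) else if c1 = 'y' then 1 else 0) = d1
  generalize (if c2 = 'b' then (2:Int) else if c2 = 'y' then 1 else 0) = d2
  generalize (if c3 = 'b' then (2:Int) else if c3 = 'y' then 1 else 0) = d3
  generalize (if c4 = 'b' then (2:Int) else if c4 = 'y' then 1 else 0) = d4
  have t0 : Int.toNat 0 = 0 := rfl
  have t1 : Int.toNat 1 = 1 := rfl
  have t2 : Int.toNat 2 = 2 := rfl
  have t3 : Int.toNat 3 = 3 := rfl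
  have t4 : Int.toNat 4 = 4 := rfl
  rw [t0, t1, t2, t3, t4]
  ring

-- ===== VERDICT (by name: the statement is the Claim_ definition above) =====
theorem convert_feedback_to_int_spec : Claim_equal_convert_feedback_to_int := by
  intro feedback _ hpre
  unfold Spec_convert_feedback_to_int convert_feedback_to_int convert_feedback_to_int_alt
  unfold Pre_convert_feedback_to_int at hpre
  have hr0 : PySem.List.pyRange 0 5 1 = [0, 1, 2, 3, 4] := by decide
  rw [hr0]
  simp only [PySem.Str.pyGet?, PySem.Chars.pyGet?]
  exact pv_key feedback.toList hpre
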